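-- pv_equiv track=rewrite | github.com/SunkSchematic0006/jeffery_423_2024_spring | target/423/107-ucode/statistics107.py | every_other_even
-- ===== SOURCE A (Python) =====
-- def every_other_even(elements):
--     latveriacafeteria = []
--     j = 1
--     for i in range(len(elements)):
--         if elements[i]%2 == 0:
--             if j % 2 == 0:
--                 i = i + 1
--                 j = j + 1
--             else:
--                 latveriacafeteria.append(elements[i])
--                 i = i + 1
--                 j = j + 1
--         else:
--             i = i + 1
--
--     return latveriacafeteria
-- ===== SOURCE B (Python) =====
-- def every_other_even(elements):
--     evens = [x for x in elements if x % 2 == 0]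
--     return evens[::2]
-- ===== Notes on version B (the rewrite author's own statement) =====
-- stated objective: simpler
-- what changed: Replaces the single pass with a parity-toggle counter and per-index appends by a two-stage pipeline: filter the evens in one comprehension, then take every other one with a stride slice evens[::2].
import Mathlib
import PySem

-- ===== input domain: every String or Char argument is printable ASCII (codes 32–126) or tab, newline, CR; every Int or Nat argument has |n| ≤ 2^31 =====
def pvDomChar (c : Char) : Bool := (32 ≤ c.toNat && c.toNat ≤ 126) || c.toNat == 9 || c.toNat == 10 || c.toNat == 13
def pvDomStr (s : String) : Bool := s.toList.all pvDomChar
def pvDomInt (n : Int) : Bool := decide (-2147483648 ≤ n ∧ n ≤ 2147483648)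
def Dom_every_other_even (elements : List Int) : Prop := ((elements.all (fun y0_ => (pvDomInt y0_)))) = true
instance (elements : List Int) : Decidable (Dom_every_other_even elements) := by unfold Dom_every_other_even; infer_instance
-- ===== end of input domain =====

-- B replaces A's single pass with a parity-toggle counter by a filter-then-stride-slice pipeline (simpler).

-- ===== PORT A =====
def every_other_even (elements : List Int) : List Int :=
  (List.foldl
    (fun (st : List Int × Int) (i : Int) =>
      if PySem.Int.mod (PySem.List.pyGetD elements i 0) 2 = 0 then
        if PySem.Int.mod st.2 2 = 0 then (st.1, st.2 + 1)
        else (st.1 ++ [PySem.List.pyGetD elements i 0], st.2 + 1)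
      else st)
    ([], 1) (PySem.List.pyRange 0 (PySem.List.len elements) 1)).1

-- ===== PORT B =====
def every_other_even_alt (elements : List Int) : List Int :=
  let evens := elements.filter (fun x => PySem.Int.mod x 2 = 0)
  (PySem.List.slice? evens none none 2).getD []

-- ===== PRECONDITION & SPEC =====
def Spec_every_other_even (elements : List Int) (out : List Int) : Prop := out = every_other_even_alt elements
instance (elements : List Int) (out : List Int) : Decidable (Spec_every_other_even elements out) := by unfold Spec_every_other_even; infer_instance

-- ===== CLAIM (what is proved, stated in full; the proofs are below) =====
def Claim_equal_every_other_even : Prop := ∀ (elements : List Int), Dom_every_other_even elements → Spec_every_other_even elements (every_other_even elements)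

-- ===== LEMMAS AND PROOFS =====

-- every other element, starting with the first (the value of ys[::2])
def pvEveryOther : List Int → List Int
  | [] => []
  | [a] => [a]
  | a :: _ :: t => a :: pvEveryOther t

-- alternating selector: pvSel true keeps the head, pvSel false drops it
def pvSel : Bool → List Int → List Int
  | _, [] => []
  | true, a :: t => a :: pvSel false t
  | false, _ :: t => pvSel true t

theorem pvSel_true_eq_everyOther : ∀ ys : List Int, pvSel true ys = pvEveryOther ys := by
  intro ys
  induction ys using pvEveryOther.induct with
  | case1 => rfl
  | case2 a => rfl
  | case3 a b t ih => simp [pvSel, pvEveryOther, ih]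

theorem pvFilterMap_range_two : ∀ t : List Int,
    List.filterMap (fun k => t[2 * k]?) (List.range ((t.length + 1) / 2)) = pvEveryOther t := by
  intro t
  induction t using pvEveryOther.induct with
  | case1 => rfl
  | case2 a => simp [List.range_succ, pvEveryOther]
  | case3 a b t ih =>
      have hc : ((a :: b :: t).length + 1) / 2 = (t.length + 1) / 2 + 1 := by
        simp only [List.length_cons]; omega
      rw [hc, List.range_succ_eq_map, List.filterMap_cons, List.filterMap_map]
      have : List.filterMap ((fun k => (a :: b :: t)[2 * k]?) ∘ Nat.succ) (List.range ((t.length + 1) / 2))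
           = List.filterMap (fun k => t[2 * k]?) (List.range ((t.length + 1) / 2)) := by
        apply List.filterMap_congr
        intro k _
        have h2 : 2 * Nat.succ k = (2 * k + 1) + 1 := by omega
        simp [Function.comp, h2]
      simp only [this, ih]
      simp [pvEveryOther]

theorem pvSlice2 (ys : List Int) :
    PySem.List.slice? ys none none 2 = some (pvEveryOther ys) := by
  simp only [PySem.List.slice?, PySem.List.sliceIndices,
    if_neg (by norm_num : ¬ (2:Int) = 0)]
  norm_num
  have hcnt : (if 0 < ys.length then (((ys.length : Int) + 2 - 1) / 2).toNat else 0)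
            = (ys.length + 1) / 2 := by
    split_ifs with h <;> omega
  rw [hcnt]
  have : List.filterMap (fun k : Nat => ys[(2 * (k:Int)).toNat]?) (List.range ((ys.length + 1) / 2))
       = List.filterMap (fun k => ys[2 * k]?) (List.range ((ys.length + 1) / 2)) := by
    apply List.filterMap_congr
    intro k _
    have : ((2:Int) * (k:Int)).toNat = 2 * k := by omega
    rw [this]
  rw [this, pvFilterMap_range_two]

-- the loop body of A
def pvF (st : List Int × Int) (x : Int) : List Int × Int :=
  if PySem.Int.mod x 2 = 0 then
    if PySem.Int.mod st.2 2 = 0 then (st.1, st.2 + 1)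
    else (st.1 ++ [x], st.2 + 1)
  else st

theorem pvLoop : ∀ (xs : List Int) (acc : List Int) (j : Int),
    (List.foldl pvF (acc, j) xs).1
      = acc ++ pvSel (if PySem.Int.mod j 2 = 0 then false else true)
          (xs.filter (fun x => PySem.Int.mod x 2 = 0)) := by
  intro xs
  induction xs with
  | nil => intro acc j; simp [pvSel]
  | cons x xs ih =>
      intro acc j
      by_cases he : PySem.Int.mod x 2 = 0
      · have hm := PySem.Int.mod_eq_emod_of_pos (a := j) (by norm_num : (0:Int) < 2)
        have hm' := PySem.Int.mod_eq_emod_of_pos (a := j + 1) (by norm_num : (0:Int) < 2)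
        by_cases hj : PySem.Int.mod j 2 = 0
        · have hj' : ¬ PySem.Int.mod (j + 1) 2 = 0 := by rw [hm']; rw [hm] at hj; omega
          simp only [List.foldl_cons, pvF, if_pos he, if_pos hj]
          rw [ih, if_neg hj',
            List.filter_cons_of_pos (by exact decide_eq_true he)]
          rfl
        · have hj' : PySem.Int.mod (j + 1) 2 = 0 := by rw [hm']; rw [hm] at hj; omega
          simp only [List.foldl_cons, pvF, if_pos he, if_neg hj]
          rw [ih, if_pos hj',
            List.filter_cons_of_pos (by exact decide_eq_true he)]
          simp only [pvSel, List.append_assoc, List.singleton_append]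
      · simp only [List.foldl_cons, pvF, if_neg he]
        rw [ih, List.filter_cons_of_neg (by simpa using he)]

-- ===== VERDICT (by name: the statement is the Claim_ definition above) =====
theorem every_other_even_spec : Claim_equal_every_other_even := by
  intro elements _
  unfold Spec_every_other_even every_other_even every_other_even_alt
  simp only [pvSlice2, Option.getD_some]
  have hb : (PySem.List.pyRange 0 (PySem.List.len elements) 1).foldl
      (fun (st : List Int × Int) (i : Int) =>
        if PySem.Int.mod (PySem.List.pyGetD elements i 0) 2 = 0 then
          if PySem.Int.mod st.2 2 = 0 then (st.1, st.2 + 1)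
          else (st.1 ++ [PySem.List.pyGetD elements i 0], st.2 + 1)
        else st) ([], 1)
      = elements.foldl pvF ([], 1) := by
    have := PySem.List.foldl_pyRange_pyGetD (xs := elements) (f := pvF) (d := 0)
      (init := (([] : List Int), (1 : Int))) (a := 0) (by norm_num)
    simpa [pvF, PySem.List.len_eq] using this
  rw [hb, pvLoop]
  have h1 : PySem.Int.mod 1 2 = 1 := by decide
  rw [if_neg (by rw [h1]; norm_num)]
  simp [pvSel_true_eq_everyOther]
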